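-- pv_equiv track=rewrite | github.com/MaiNavon/Repository-Summarizer | app/tools/file_analyzer.py | detect_tools
-- ===== SOURCE A (Python) =====
-- from typing import List, Dict, Set
--
-- def detect_tools(file_tree: List[str], config_files: Dict[str, str]) -> List[str]:
--     """
--     Detects build tools, CI/CD, containerization.
--
--     Args:
--         file_tree: List of file paths
--         config_files: Dict mapping file paths to contents
--
--     Returns:
--         Sorted list of detected tools
--     """
--     tools: Set[str] = set()
--
--     # CI/CD detection from file paths
--     ci_patterns = {
--         ".github/workflows": "GitHub Actions",
--         ".gitlab-ci.yml": "GitLab CI",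
--         "Jenkinsfile": "Jenkins",
--         ".circleci": "CircleCI",
--         ".travis.yml": "Travis CI",
--         "azure-pipelines": "Azure Pipelines",
--         "bitbucket-pipelines": "Bitbucket Pipelines",
--     }
--
--     for file_path in file_tree:
--         for pattern, tool in ci_patterns.items():
--             if pattern in file_path:
--                 tools.add(tool)
--
--     # Containerization
--     for file_path in file_tree:
--         file_lower = file_path.lower()
--         if "dockerfile" in file_lower:
--             tools.add("Docker")
--         if "docker-compose" in file_lower:
--             tools.add("Docker Compose")
--         if "kubernetes" in file_lower or "k8s" in file_lower:
--             tools.add("Kubernetes")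
--         if file_lower.endswith(".tf"):
--             tools.add("Terraform")
--         if "helm" in file_lower:
--             tools.add("Helm")
--
--     # Build tools from file paths
--     build_patterns = {
--         "Makefile": "Make",
--         "webpack.config": "Webpack",
--         "vite.config": "Vite",
--         "rollup.config": "Rollup",
--         "tsconfig.json": "TypeScript",
--         "babel.config": "Babel",
--         ".eslintrc": "ESLint",
--         ".prettierrc": "Prettier",
--         "tox.ini": "tox",
--         "noxfile.py": "nox",
--         ".pre-commit": "pre-commit",
--         "renovate.json": "Renovate",
--         "dependabot.yml": "Dependabot",
--     }
--
--     for file_path in file_tree: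
--         for pattern, tool in build_patterns.items():
--             if pattern in file_path:
--                 tools.add(tool)
--
--     return sorted(list(tools))
-- ===== SOURCE B (Python) =====
-- from typing import List, Dict
--
-- def detect_tools(file_tree: List[str], config_files: Dict[str, str]) -> List[str]:
--     # Concatenate all paths into one newline-joined text (newline occurs in no
--     # pattern, so a pattern is in the text iff it is in some single path) and do a
--     # fixed number of substring tests on it instead of looping over the files.
--     text = "\n".join(file_tree)
--     low = text.lower()
--     found = []
--     if ".github/workflows" in text: found.append("GitHub Actions")
--     if ".gitlab-ci.yml" in text: found.append("GitLab CI")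
--     if "Jenkinsfile" in text: found.append("Jenkins")
--     if ".circleci" in text: found.append("CircleCI")
--     if ".travis.yml" in text: found.append("Travis CI")
--     if "azure-pipelines" in text: found.append("Azure Pipelines")
--     if "bitbucket-pipelines" in text: found.append("Bitbucket Pipelines")
--     if "dockerfile" in low: found.append("Docker")
--     if "docker-compose" in low: found.append("Docker Compose")
--     if "kubernetes" in low or "k8s" in low: found.append("Kubernetes")
--     if any(f.lower().endswith(".tf") for f in file_tree): found.append("Terraform")
--     if "helm" in low: found.append("Helm")
--     if "Makefile" in text: found.append("Make")
--     if "webpack.config" in text: found.append("Webpack")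
--     if "vite.config" in text: found.append("Vite")
--     if "rollup.config" in text: found.append("Rollup")
--     if "tsconfig.json" in text: found.append("TypeScript")
--     if "babel.config" in text: found.append("Babel")
--     if ".eslintrc" in text: found.append("ESLint")
--     if ".prettierrc" in text: found.append("Prettier")
--     if "tox.ini" in text: found.append("tox")
--     if "noxfile.py" in text: found.append("nox")
--     if ".pre-commit" in text: found.append("pre-commit")
--     if "renovate.json" in text: found.append("Renovate")
--     if "dependabot.yml" in text: found.append("Dependabot")
--     return sorted(found)
-- ===== Notes on version B (the rewrite author's own statement) =====
-- stated objective: faster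
-- what changed: A runs three file-major Python loops over file_tree matching pattern tables into a set; B joins all paths into one newline-separated text (newline occurs in no pattern, so a pattern is in the text iff it is in some path) and does one fixed sequence of 25 substring tests on that text / its lowercase (Terraform's endswith stays per-file), sorting the hit list.
import Mathlib
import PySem

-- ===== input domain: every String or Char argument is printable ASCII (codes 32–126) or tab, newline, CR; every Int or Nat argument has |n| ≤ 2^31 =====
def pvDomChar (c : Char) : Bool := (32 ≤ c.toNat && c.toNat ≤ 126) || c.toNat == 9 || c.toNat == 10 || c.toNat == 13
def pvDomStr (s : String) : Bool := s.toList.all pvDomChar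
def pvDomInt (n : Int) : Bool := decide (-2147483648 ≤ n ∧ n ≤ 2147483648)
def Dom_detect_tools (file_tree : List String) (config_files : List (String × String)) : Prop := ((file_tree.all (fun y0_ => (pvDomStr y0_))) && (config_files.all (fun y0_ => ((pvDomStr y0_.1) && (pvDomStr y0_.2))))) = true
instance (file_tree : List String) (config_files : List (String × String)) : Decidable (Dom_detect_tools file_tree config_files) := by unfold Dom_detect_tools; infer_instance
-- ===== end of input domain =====

-- B joins all paths into one newline-separated text (no pattern contains a newline, so a
-- pattern is in the text iff it is in some path) and replaces A's three file-major scans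
-- by one fixed sequence of substring tests on that text / its lowercase (alternative decomposition).

-- ===== PORT A =====
def ciPatterns : List (String × String) :=
  [(".github/workflows", "GitHub Actions"), (".gitlab-ci.yml", "GitLab CI"),
   ("Jenkinsfile", "Jenkins"), (".circleci", "CircleCI"), (".travis.yml", "Travis CI"),
   ("azure-pipelines", "Azure Pipelines"), ("bitbucket-pipelines", "Bitbucket Pipelines")]

def buildPatterns : List (String × String) :=
  [("Makefile", "Make"), ("webpack.config", "Webpack"), ("vite.config", "Vite"),
   ("rollup.config", "Rollup"), ("tsconfig.json", "TypeScript"), ("babel.config", "Babel"),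
   (".eslintrc", "ESLint"), (".prettierrc", "Prettier"), ("tox.ini", "tox"),
   ("noxfile.py", "nox"), (".pre-commit", "pre-commit"), ("renovate.json", "Renovate"),
   ("dependabot.yml", "Dependabot")]

-- the 'for pattern, tool in patterns.items(): if pattern in file_path: tools.add(tool)' inner loop
def patStep (pats : List (String × String)) (t : PySem.Set String) (fp : String) : PySem.Set String :=
  pats.foldl (fun t pt => if PySem.Str.isIn pt.1 fp then PySem.Set.add t pt.2 else t) t

-- the containerization loop body
def contStep (t : PySem.Set String) (fp : String) : PySem.Set String :=
  let fl := PySem.Str.lower fp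
  let t1 := if PySem.Str.isIn "dockerfile" fl then PySem.Set.add t "Docker" else t
  let t2 := if PySem.Str.isIn "docker-compose" fl then PySem.Set.add t1 "Docker Compose" else t1
  let t3 := if PySem.Str.isIn "kubernetes" fl || PySem.Str.isIn "k8s" fl then PySem.Set.add t2 "Kubernetes" else t2
  let t4 := if PySem.Str.endswith fl ".tf" then PySem.Set.add t3 "Terraform" else t3
  if PySem.Str.isIn "helm" fl then PySem.Set.add t4 "Helm" else t4

def detect_tools (file_tree : List String) (config_files : List (String × String)) : List String :=
  let tools : PySem.Set String := PySem.Set.empty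
  let tools := file_tree.foldl (patStep ciPatterns) tools
  let tools := file_tree.foldl contStep tools
  let tools := file_tree.foldl (patStep buildPatterns) tools
  PySem.List.sorted tools (fun x => x) false

-- ===== PORT B =====
-- 'if c: found.append(t)'
def appIf (l : List String) (c : Bool) (t : String) : List String := if c then l ++ [t] else l

def detect_tools_alt (file_tree : List String) (config_files : List (String × String)) : List String :=
  let text := PySem.Str.join "\n" file_tree
  let low := PySem.Str.lower text
  let found : List String := []
  let found := appIf found (PySem.Str.isIn ".github/workflows" text) "GitHub Actions"
  let found := appIf found (PySem.Str.isIn ".gitlab-ci.yml" text) "GitLab CI"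
  let found := appIf found (PySem.Str.isIn "Jenkinsfile" text) "Jenkins"
  let found := appIf found (PySem.Str.isIn ".circleci" text) "CircleCI"
  let found := appIf found (PySem.Str.isIn ".travis.yml" text) "Travis CI"
  let found := appIf found (PySem.Str.isIn "azure-pipelines" text) "Azure Pipelines"
  let found := appIf found (PySem.Str.isIn "bitbucket-pipelines" text) "Bitbucket Pipelines"
  let found := appIf found (PySem.Str.isIn "dockerfile" low) "Docker"
  let found := appIf found (PySem.Str.isIn "docker-compose" low) "Docker Compose"
  let found := appIf found (PySem.Str.isIn "kubernetes" low || PySem.Str.isIn "k8s" low) "Kubernetes"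
  let found := appIf found (file_tree.any (fun f => PySem.Str.endswith (PySem.Str.lower f) ".tf")) "Terraform"
  let found := appIf found (PySem.Str.isIn "helm" low) "Helm"
  let found := appIf found (PySem.Str.isIn "Makefile" text) "Make"
  let found := appIf found (PySem.Str.isIn "webpack.config" text) "Webpack"
  let found := appIf found (PySem.Str.isIn "vite.config" text) "Vite"
  let found := appIf found (PySem.Str.isIn "rollup.config" text) "Rollup"
  let found := appIf found (PySem.Str.isIn "tsconfig.json" text) "TypeScript"
  let found := appIf found (PySem.Str.isIn "babel.config" text) "Babel"
  let found := appIf found (PySem.Str.isIn ".eslintrc" text) "ESLint"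
  let found := appIf found (PySem.Str.isIn ".prettierrc" text) "Prettier"
  let found := appIf found (PySem.Str.isIn "tox.ini" text) "tox"
  let found := appIf found (PySem.Str.isIn "noxfile.py" text) "nox"
  let found := appIf found (PySem.Str.isIn ".pre-commit" text) "pre-commit"
  let found := appIf found (PySem.Str.isIn "renovate.json" text) "Renovate"
  let found := appIf found (PySem.Str.isIn "dependabot.yml" text) "Dependabot"
  PySem.List.sorted found (fun x => x) false

-- ===== PRECONDITION & SPEC =====
def Spec_detect_tools (file_tree : List String) (config_files : List (String × String)) (out : List String) : Prop := out = detect_tools_alt file_tree config_files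
instance (file_tree : List String) (config_files : List (String × String)) (out : List String) : Decidable (Spec_detect_tools file_tree config_files out) := by unfold Spec_detect_tools; infer_instance

-- ===== CLAIM (what is proved, stated in full; the proofs are below) =====
def Claim_equal_detect_tools : Prop := ∀ (file_tree : List String) (config_files : List (String × String)), Dom_detect_tools file_tree config_files → Spec_detect_tools file_tree config_files (detect_tools file_tree config_files)

-- ===== LEMMAS AND PROOFS =====

-- A's 25 rules in tool-major (predicate, tool) form: the common reference both programs are reduced to
def liftPat (pt : String × String) : (String → Bool) × String :=
  (fun f => PySem.Str.isIn pt.1 f, pt.2)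

def contRules : List ((String → Bool) × String) :=
  [(fun f => PySem.Str.isIn "dockerfile" (PySem.Str.lower f), "Docker"),
   (fun f => PySem.Str.isIn "docker-compose" (PySem.Str.lower f), "Docker Compose"),
   (fun f => PySem.Str.isIn "kubernetes" (PySem.Str.lower f) || PySem.Str.isIn "k8s" (PySem.Str.lower f), "Kubernetes"),
   (fun f => PySem.Str.endswith (PySem.Str.lower f) ".tf", "Terraform"),
   (fun f => PySem.Str.isIn "helm" (PySem.Str.lower f), "Helm")]

def aRules : List ((String → Bool) × String) :=
[
   (fun f => PySem.Str.isIn ".github/workflows" f, "GitHub Actions"),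
   (fun f => PySem.Str.isIn ".gitlab-ci.yml" f, "GitLab CI"),
   (fun f => PySem.Str.isIn "Jenkinsfile" f, "Jenkins"),
   (fun f => PySem.Str.isIn ".circleci" f, "CircleCI"),
   (fun f => PySem.Str.isIn ".travis.yml" f, "Travis CI"),
   (fun f => PySem.Str.isIn "azure-pipelines" f, "Azure Pipelines"),
   (fun f => PySem.Str.isIn "bitbucket-pipelines" f, "Bitbucket Pipelines"),
   (fun f => PySem.Str.isIn "dockerfile" (PySem.Str.lower f), "Docker"),
   (fun f => PySem.Str.isIn "docker-compose" (PySem.Str.lower f), "Docker Compose"),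
   (fun f => PySem.Str.isIn "kubernetes" (PySem.Str.lower f) || PySem.Str.isIn "k8s" (PySem.Str.lower f), "Kubernetes"),
   (fun f => PySem.Str.endswith (PySem.Str.lower f) ".tf", "Terraform"),
   (fun f => PySem.Str.isIn "helm" (PySem.Str.lower f), "Helm"),
   (fun f => PySem.Str.isIn "Makefile" f, "Make"),
   (fun f => PySem.Str.isIn "webpack.config" f, "Webpack"),
   (fun f => PySem.Str.isIn "vite.config" f, "Vite"),
   (fun f => PySem.Str.isIn "rollup.config" f, "Rollup"),
   (fun f => PySem.Str.isIn "tsconfig.json" f, "TypeScript"),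
   (fun f => PySem.Str.isIn "babel.config" f, "Babel"),
   (fun f => PySem.Str.isIn ".eslintrc" f, "ESLint"),
   (fun f => PySem.Str.isIn ".prettierrc" f, "Prettier"),
   (fun f => PySem.Str.isIn "tox.ini" f, "tox"),
   (fun f => PySem.Str.isIn "noxfile.py" f, "nox"),
   (fun f => PySem.Str.isIn ".pre-commit" f, "pre-commit"),
   (fun f => PySem.Str.isIn "renovate.json" f, "Renovate"),
   (fun f => PySem.Str.isIn "dependabot.yml" f, "Dependabot")]

-- the reference form: the tools of the rules some file matches, in rule order, then sorted
def tableForm (file_tree : List String) : List String :=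
  PySem.List.sorted ((aRules.filter (fun r => file_tree.any r.1)).map (fun r => r.2)) (fun x => x) false

theorem aRules_decomp : aRules = ciPatterns.map liftPat ++ contRules ++ buildPatterns.map liftPat := rfl

-- membership in a foldl whose step adds exactly the elements described by P
theorem mem_foldl_char {α : Type} (step : PySem.Set String → α → PySem.Set String)
    (P : α → String → Prop)
    (h : ∀ t f x, x ∈ step t f ↔ x ∈ t ∨ P f x)
    (l : List α) (s : PySem.Set String) (x : String) :
    x ∈ l.foldl step s ↔ x ∈ s ∨ ∃ f ∈ l, P f x := by
  induction l generalizing s with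
  | nil => simp
  | cons a l ih =>
    simp only [List.foldl_cons, ih, h, List.mem_cons]
    constructor
    · rintro ((hs | ha) | ⟨f, hf, hx⟩)
      · exact Or.inl hs
      · exact Or.inr ⟨a, Or.inl rfl, ha⟩
      · exact Or.inr ⟨f, Or.inr hf, hx⟩
    · rintro (hs | ⟨f, (rfl | hf), hx⟩)
      · exact Or.inl (Or.inl hs)
      · exact Or.inl (Or.inr hx)
      · exact Or.inr ⟨f, hf, hx⟩

theorem mem_patStep (pats : List (String × String)) (t : PySem.Set String) (fp x : String) :
    x ∈ patStep pats t fp ↔ x ∈ t ∨ ∃ r ∈ pats.map liftPat, r.1 fp = true ∧ x = r.2 := by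
  unfold patStep
  induction pats generalizing t with
  | nil => simp
  | cons p ps ih =>
    simp only [List.foldl_cons, ih, List.map_cons, List.mem_cons, liftPat]
    by_cases h : PySem.Str.isIn p.1 fp = true
    · simp only [h, if_pos, PySem.Set.mem_add]
      constructor
      · rintro ((hs | rfl) | ⟨r, hr, h1, rfl⟩)
        · exact Or.inl hs
        · exact Or.inr ⟨_, Or.inl rfl, h, rfl⟩
        · exact Or.inr ⟨r, Or.inr hr, h1, rfl⟩
      · rintro (hs | ⟨r, (rfl | hr), h1, rfl⟩)
        · exact Or.inl (Or.inl hs)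
        · exact Or.inl (Or.inr rfl)
        · exact Or.inr ⟨r, hr, h1, rfl⟩
    · simp only [h, if_neg, Bool.not_eq_true]
      constructor
      · rintro (hs | ⟨r, hr, h1, rfl⟩)
        · exact Or.inl hs
        · exact Or.inr ⟨r, Or.inr hr, h1, rfl⟩
      · rintro (hs | ⟨r, (rfl | hr), h1, rfl⟩)
        · exact Or.inl hs
        · exact absurd h1 h
        · exact Or.inr ⟨r, hr, h1, rfl⟩

theorem mem_ite_add (c : Bool) (t : PySem.Set String) (y x : String) :
    x ∈ (if c then PySem.Set.add t y else t) ↔ x ∈ t ∨ (c = true ∧ x = y) := by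
  cases c <;> simp [PySem.Set.mem_add]

theorem mem_contStep (t : PySem.Set String) (fp x : String) :
    x ∈ contStep t fp ↔ x ∈ t ∨ ∃ r ∈ contRules, r.1 fp = true ∧ x = r.2 := by
  simp only [contStep, mem_ite_add]
  simp only [contRules, List.exists_mem_cons_iff, List.not_mem_nil, false_and, exists_false,
    or_false]
  simp only [or_assoc]

-- Nodup is preserved by the set-building folds
theorem nodup_foldl {α : Type} (step : PySem.Set String → α → PySem.Set String)
    (h : ∀ t f, t.Nodup → (step t f).Nodup)
    (l : List α) (s : PySem.Set String) (hs : s.Nodup) : (l.foldl step s).Nodup := by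
  induction l generalizing s with
  | nil => exact hs
  | cons a l ih => exact ih _ (h _ _ hs)

theorem nodup_patStep (pats : List (String × String)) (t : PySem.Set String) (fp : String)
    (ht : t.Nodup) : (patStep pats t fp).Nodup := by
  unfold patStep
  induction pats generalizing t with
  | nil => exact ht
  | cons p ps ih =>
    simp only [List.foldl_cons]
    apply ih
    split_ifs <;> [exact PySem.Set.nodup_add _ _ ht; exact ht]

theorem nodup_contStep (t : PySem.Set String) (fp : String) (ht : t.Nodup) :
    (contStep t fp).Nodup := by
  simp only [contStep]
  split_ifs <;> repeat first | assumption | apply PySem.Set.nodup_add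

-- swap the two quantifiers: "some file matches some rule" = "some rule has a matching file"
theorem exists_swap_rules (rules : List ((String → Bool) × String)) (ft : List String) (x : String) :
    (∃ f ∈ ft, ∃ r ∈ rules, r.1 f = true ∧ x = r.2) ↔
      ∃ r ∈ rules, ft.any r.1 = true ∧ x = r.2 := by
  simp only [List.any_eq_true]
  constructor
  · rintro ⟨f, hf, r, hr, h1, rfl⟩
    exact ⟨r, hr, ⟨f, hf, h1⟩, rfl⟩
  · rintro ⟨r, hr, ⟨f, hf, h1⟩, rfl⟩
    exact ⟨f, hf, r, hr, h1, rfl⟩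

theorem mem_detect_tools_set (ft : List String) (x : String) :
    x ∈ (ft.foldl (patStep buildPatterns) (ft.foldl contStep (ft.foldl (patStep ciPatterns) PySem.Set.empty)))
      ↔ ∃ r ∈ aRules, ft.any r.1 = true ∧ x = r.2 := by
  rw [mem_foldl_char (patStep buildPatterns) (fun f x => ∃ r ∈ buildPatterns.map liftPat, r.1 f = true ∧ x = r.2) (fun t f x => mem_patStep _ t f x),
      mem_foldl_char contStep (fun f x => ∃ r ∈ contRules, r.1 f = true ∧ x = r.2) (fun t f x => mem_contStep t f x),
      mem_foldl_char (patStep ciPatterns) (fun f x => ∃ r ∈ ciPatterns.map liftPat, r.1 f = true ∧ x = r.2) (fun t f x => mem_patStep _ t f x)]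
  rw [aRules_decomp]
  simp only [PySem.Set.empty, List.not_mem_nil, false_or, exists_swap_rules, List.mem_append]
  constructor
  · rintro ((⟨r, hr, h⟩ | ⟨r, hr, h⟩) | ⟨r, hr, h⟩)
    · exact ⟨r, Or.inl (Or.inl hr), h⟩
    · exact ⟨r, Or.inl (Or.inr hr), h⟩
    · exact ⟨r, Or.inr hr, h⟩
  · rintro ⟨r, ((hr | hr) | hr), h⟩
    · exact Or.inl (Or.inl ⟨r, hr, h⟩)
    · exact Or.inl (Or.inr ⟨r, hr, h⟩)
    · exact Or.inr ⟨r, hr, h⟩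

theorem nodup_aRules_tools : (aRules.map (fun r => r.2)).Nodup := by decide

-- A equals the reference form
theorem a_eq_table (ft : List String) (cf : List (String × String)) :
    detect_tools ft cf = tableForm ft := by
  unfold detect_tools tableForm
  rw [PySem.List.sorted_id_eq_sorted_id_iff_perm]
  rw [List.perm_ext_iff_of_nodup]
  · intro x
    rw [mem_detect_tools_set]
    simp only [List.mem_map, List.mem_filter]
    constructor
    · rintro ⟨r, hr, ha, rfl⟩
      exact ⟨r, ⟨hr, ha⟩, rfl⟩
    · rintro ⟨r, ⟨hr, ha⟩, rfl⟩
      exact ⟨r, hr, ha, rfl⟩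
  · exact nodup_foldl _ (fun t f ht => nodup_patStep _ t f ht) _ _
      (nodup_foldl _ (fun t f ht => nodup_contStep t f ht) _ _
        (nodup_foldl _ (fun t f ht => nodup_patStep _ t f ht) _ _ List.nodup_nil))
  · exact nodup_aRules_tools.sublist (List.filter_sublist.map _)

-- ---- the joined-text lemmas for B ----

-- a pattern avoiding the separator cannot straddle it: prefix form
theorem prefix_append_sep {sep : Char} {p : List Char} (x y : List Char) (h : sep ∉ p) :
    p <+: x ++ sep :: y ↔ p <+: x := by
  induction x generalizing p with
  | nil =>
    cases p with
    | nil => simp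
    | cons a q =>
      simp only [List.nil_append, List.cons_prefix_cons]
      constructor
      · rintro ⟨rfl, -⟩
        exact absurd List.mem_cons_self h
      · intro hp
        exact absurd (List.prefix_nil.mp hp) (by simp)
  | cons b x ih =>
    cases p with
    | nil => simp
    | cons a q =>
      have h' : sep ∉ q := fun hq => h (List.mem_cons_of_mem _ hq)
      simp only [List.cons_append, List.cons_prefix_cons, ih h']

-- and infix form: an infix of  x ++ sep :: y  avoiding sep is an infix of x or of y
theorem infix_append_sep {sep : Char} {p : List Char} (x y : List Char) (h : sep ∉ p) :
    p <:+: x ++ sep :: y ↔ p <:+: x ∨ p <:+: y := by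
  induction x with
  | nil =>
    simp only [List.nil_append, List.infix_cons_iff, List.infix_nil]
    have hp : p <+: sep :: y ↔ p = [] := by
      cases p with
      | nil => simp
      | cons a q =>
        simp only [List.cons_prefix_cons]
        constructor
        · rintro ⟨rfl, -⟩
          exact absurd List.mem_cons_self h
        · intro hq
          exact absurd hq (by simp)
    rw [hp]
  | cons b x ih =>
    have h1 : p <+: b :: (x ++ sep :: y) ↔ p <+: b :: x := prefix_append_sep (b :: x) y h
    rw [show ((b :: x) ++ sep :: y : List Char) = b :: (x ++ sep :: y) from rfl,
        List.infix_cons_iff, ih, h1, List.infix_cons_iff]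
    tauto

-- a nonempty pattern avoiding the separator is in the joined text iff it is in some part
theorem infix_join {sep : Char} {p : List Char} (l : List (List Char)) (hne : p ≠ [])
    (h : sep ∉ p) : p <:+: PySem.Chars.join [sep] l ↔ ∃ f ∈ l, p <:+: f := by
  induction l with
  | nil => simp [PySem.Chars.join_nil, List.infix_nil, hne]
  | cons a t ih =>
    cases t with
    | nil => simp [PySem.Chars.join_singleton]
    | cons b r =>
      rw [PySem.Chars.join_cons_cons,
          show a ++ [sep] ++ PySem.Chars.join [sep] (b :: r)
            = a ++ sep :: PySem.Chars.join [sep] (b :: r) by simp,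
          infix_append_sep _ _ h, ih]
      simp only [List.exists_mem_cons_iff]

-- lower() commutes with the newline join
theorem lower_join (l : List (List Char)) :
    PySem.Chars.lower (PySem.Chars.join ['\n'] l) = PySem.Chars.join ['\n'] (l.map PySem.Chars.lower) := by
  induction l with
  | nil => simp [PySem.Chars.join_nil, PySem.Chars.lower]
  | cons a t ih =>
    cases t with
    | nil => simp [PySem.Chars.join_singleton]
    | cons b r =>
      have ih' : PySem.Chars.lower (PySem.Chars.join ['\n'] (b :: r))
          = PySem.Chars.join ['\n'] (PySem.Chars.lower b :: r.map PySem.Chars.lower) := by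
        simpa using ih
      have hn : PySem.Chars.lowerChar '\n' = '\n' := by decide
      rw [PySem.Chars.join_cons_cons, List.map_cons, List.map_cons, PySem.Chars.join_cons_cons,
          ← ih']
      simp [PySem.Chars.lower, List.map_append, hn]

-- 'pat in "\n".join(ft)'  =  any('pat in f' for f in ft)
theorem isIn_join_any (p : String) (ft : List String) (hne : p.toList ≠ [])
    (h : '\n' ∉ p.toList) :
    PySem.Str.isIn p (PySem.Str.join "\n" ft) = ft.any (fun f => PySem.Str.isIn p f) := by
  rw [Bool.eq_iff_iff, PySem.Str.isIn_iff_infix, PySem.Str.toList_join,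
      show ("\n".toList : List Char) = ['\n'] from rfl, infix_join _ hne h, List.any_eq_true]
  simp only [List.mem_map]
  constructor
  · rintro ⟨g, ⟨f, hf, rfl⟩, hp⟩
    exact ⟨f, hf, (PySem.Str.isIn_iff_infix p f).mpr hp⟩
  · rintro ⟨f, hf, hp⟩
    exact ⟨f.toList, ⟨f, hf, rfl⟩, (PySem.Str.isIn_iff_infix p f).mp hp⟩

-- the same over the lowercased join
theorem isIn_lower_join_any (p : String) (ft : List String) (hne : p.toList ≠ [])
    (h : '\n' ∉ p.toList) :
    PySem.Str.isIn p (PySem.Str.lower (PySem.Str.join "\n" ft))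
      = ft.any (fun f => PySem.Str.isIn p (PySem.Str.lower f)) := by
  rw [Bool.eq_iff_iff, PySem.Str.isIn_iff_infix, PySem.Str.toList_lower, PySem.Str.toList_join,
      show ("\n".toList : List Char) = ['\n'] from rfl, lower_join, infix_join _ hne h,
      List.any_eq_true]
  simp only [List.mem_map]
  constructor
  · rintro ⟨g, ⟨g', ⟨f, hf, rfl⟩, rfl⟩, hp⟩
    refine ⟨f, hf, (PySem.Str.isIn_iff_infix _ _).mpr ?_⟩
    rwa [PySem.Str.toList_lower]
  · rintro ⟨f, hf, hp⟩
    refine ⟨PySem.Chars.lower f.toList, ⟨f.toList, ⟨f, hf, rfl⟩, rfl⟩, ?_⟩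
    have := (PySem.Str.isIn_iff_infix p (PySem.Str.lower f)).mp hp
    rwa [PySem.Str.toList_lower] at this

theorem any_or_split {α : Type} (l : List α) (p q : α → Bool) :
    (l.any fun x => p x || q x) = (l.any p || l.any q) := by
  induction l with
  | nil => rfl
  | cons a t ih =>
    simp only [List.any_cons, ih]
    cases p a <;> cases q a <;> simp

theorem appIf_eq (l : List String) (c : Bool) (t : String) :
    appIf l c t = l ++ (if c then [t] else []) := by
  cases c <;> simp [appIf]

theorem filter_map_cons {α β : Type} (p : α → Bool) (f : α → β) (r : α) (rs : List α) :
    ((r :: rs).filter p).map f = (if p r then [f r] else []) ++ (rs.filter p).map f := by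
  by_cases h : p r = true <;> simp [h]

-- B equals the reference form
theorem alt_eq_table (file_tree : List String) (cf : List (String × String)) :
    detect_tools_alt file_tree cf = tableForm file_tree := by
  unfold detect_tools_alt tableForm aRules
  simp only [appIf_eq, List.nil_append, List.append_assoc, filter_map_cons,
    List.filter_nil, List.map_nil, List.append_nil]
  rw [isIn_join_any ".github/workflows" file_tree (by decide) (by decide)]
  rw [isIn_join_any ".gitlab-ci.yml" file_tree (by decide) (by decide)]
  rw [isIn_join_any "Jenkinsfile" file_tree (by decide) (by decide)]
  rw [isIn_join_any ".circleci" file_tree (by decide) (by decide)]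
  rw [isIn_join_any ".travis.yml" file_tree (by decide) (by decide)]
  rw [isIn_join_any "azure-pipelines" file_tree (by decide) (by decide)]
  rw [isIn_join_any "bitbucket-pipelines" file_tree (by decide) (by decide)]
  rw [isIn_lower_join_any "dockerfile" file_tree (by decide) (by decide)]
  rw [isIn_lower_join_any "docker-compose" file_tree (by decide) (by decide)]
  rw [isIn_lower_join_any "kubernetes" file_tree (by decide) (by decide)]
  rw [isIn_lower_join_any "k8s" file_tree (by decide) (by decide)]
  rw [isIn_lower_join_any "helm" file_tree (by decide) (by decide)]
  rw [isIn_join_any "Makefile" file_tree (by decide) (by decide)]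
  rw [isIn_join_any "webpack.config" file_tree (by decide) (by decide)]
  rw [isIn_join_any "vite.config" file_tree (by decide) (by decide)]
  rw [isIn_join_any "rollup.config" file_tree (by decide) (by decide)]
  rw [isIn_join_any "tsconfig.json" file_tree (by decide) (by decide)]
  rw [isIn_join_any "babel.config" file_tree (by decide) (by decide)]
  rw [isIn_join_any ".eslintrc" file_tree (by decide) (by decide)]
  rw [isIn_join_any ".prettierrc" file_tree (by decide) (by decide)]
  rw [isIn_join_any "tox.ini" file_tree (by decide) (by decide)]
  rw [isIn_join_any "noxfile.py" file_tree (by decide) (by decide)]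
  rw [isIn_join_any ".pre-commit" file_tree (by decide) (by decide)]
  rw [isIn_join_any "renovate.json" file_tree (by decide) (by decide)]
  rw [isIn_join_any "dependabot.yml" file_tree (by decide) (by decide)]
  rw [any_or_split file_tree (fun f => PySem.Str.isIn "kubernetes" (PySem.Str.lower f)) (fun f => PySem.Str.isIn "k8s" (PySem.Str.lower f))]

-- ===== VERDICT (by name: the statement is the Claim_ definition above) =====
theorem detect_tools_spec : Claim_equal_detect_tools := by
  intro ft cf _
  show detect_tools ft cf = detect_tools_alt ft cf
  rw [a_eq_table, alt_eq_table]
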